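-- pv_equiv track=rewrite | github.com/Anilsevinc/ai-builder-challenge-hackathon | src/modules/basic_math.py | _has_operator_without_operand
-- ===== SOURCE A (Python) =====
-- def _has_operator_without_operand(compact_expression: str) -> bool:
--     """Checks if an operator lacks a numeric operand on the right side."""
--     operators = "+-*/"
--     length = len(compact_expression)
--
--     for index, char in enumerate(compact_expression):
--         if char not in operators:
--             continue
--
--         # Allow unary minus at the start
--         if char == '-' and index == 0 and length > 1:
--             continue
--
--         remaining = compact_expression[index + 1 :]
--         if not remaining:
--             return True
--
--         if not any(ch.isdigit() for ch in remaining):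
--             return True
--
--     return False
-- ===== SOURCE B (Python) =====
-- def _has_operator_without_operand(compact_expression: str) -> bool:
--     """Single right-to-left pass: the answer depends only on the last
--     (non-exempt) operator, since any earlier operator sees a superset suffix."""
--     has_digit = False
--     for ch in reversed(compact_expression[1:]):
--         if ch.isdigit():
--             has_digit = True
--         elif ch in "+-*/":
--             return not has_digit
--     if compact_expression and compact_expression[0] in "+-*/" and not (
--         compact_expression[0] == '-' and len(compact_expression) > 1
--     ):
--         return not has_digit
--     return False
-- ===== Notes on version B (the rewrite author's own statement) =====
-- stated objective: alternative
-- what changed: Replaces A's left-to-right scan that searches the whole remaining suffix for a digit at every operator with a single right-to-left pass carrying a has-digit flag, deciding at the first operator seen from the right.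
import Mathlib
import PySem

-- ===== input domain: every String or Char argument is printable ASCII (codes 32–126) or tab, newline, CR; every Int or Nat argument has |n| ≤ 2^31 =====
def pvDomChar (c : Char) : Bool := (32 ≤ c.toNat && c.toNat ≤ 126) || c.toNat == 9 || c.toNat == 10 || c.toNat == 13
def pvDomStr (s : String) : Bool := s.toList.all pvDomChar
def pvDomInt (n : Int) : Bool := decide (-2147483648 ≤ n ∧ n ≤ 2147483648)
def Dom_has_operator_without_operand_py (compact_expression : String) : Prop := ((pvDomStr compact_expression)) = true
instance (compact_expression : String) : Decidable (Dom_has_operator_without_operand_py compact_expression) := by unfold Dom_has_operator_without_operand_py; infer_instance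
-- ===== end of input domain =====

-- B replaces A's left-to-right scan (a fresh digit search of the remaining suffix at every
-- operator) with one right-to-left pass carrying a has-digit flag; return values proved equal.

-- ===== PORT A =====
-- char in "+-*/"
def pvIsOp (c : Char) : Bool := c = '+' || c = '-' || c = '*' || c = '/'

-- the for-loop of A over enumerate(compact_expression), early return as recursion
def pvLoopA (full : List Char) (length : Int) : List (Int × Char) → Bool
  | [] => false
  | (index, char) :: rest =>
    if ¬ pvIsOp char then pvLoopA full length rest          -- continue
    else if char = '-' ∧ index = 0 ∧ length > 1 then pvLoopA full length rest  -- unary minus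
    else
      let remaining := PySem.List.slice full (some (index + 1)) none  -- s[index+1:]
      if remaining = [] then true
      else if ¬ remaining.any PySem.Chars.isdigit then true
      else pvLoopA full length rest

def has_operator_without_operand_py (compact_expression : String) : Bool :=
  pvLoopA compact_expression.toList (Int.ofNat compact_expression.toList.length)
    (PySem.List.enumerate compact_expression.toList 0)

-- ===== PORT B =====
-- Source B's for-loop over reversed(s[1:]): inl = early return, inr = final has_digit
def pvLoopB (hd : Bool) : List Char → Bool ⊕ Bool
  | [] => .inr hd
  | ch :: rest =>
    if PySem.Chars.isdigit ch then pvLoopB true rest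
    else if pvIsOp ch then .inl (!hd)
    else pvLoopB hd rest

def has_operator_without_operand_py_alt (compact_expression : String) : Bool :=
  match compact_expression.toList with
  | [] => false                                  -- "if compact_expression" fails
  | c :: t =>                                    -- c = s[0], t = s[1:], len(s) > 1 ↔ t ≠ []
    match pvLoopB false t.reverse with
    | .inl b => b
    | .inr hd => if pvIsOp c ∧ ¬ (c = '-' ∧ t ≠ []) then !hd else false

-- ===== PRECONDITION & SPEC =====
def Spec_has_operator_without_operand_py (compact_expression : String) (out : Bool) : Prop := out = has_operator_without_operand_py_alt compact_expression
instance (compact_expression : String) (out : Bool) : Decidable (Spec_has_operator_without_operand_py compact_expression out) := by unfold Spec_has_operator_without_operand_py; infer_instance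

-- ===== CLAIM (what is proved, stated in full; the proofs are below) =====
def Claim_equal_has_operator_without_operand_py : Prop := ∀ (compact_expression : String), Dom_has_operator_without_operand_py compact_expression → Spec_has_operator_without_operand_py compact_expression (has_operator_without_operand_py compact_expression)

-- ===== LEMMAS AND PROOFS =====

-- reference function: A's behaviour on a segment with indices ≥ 1 (no unary-minus case)
def pvF : List Char → Bool
  | [] => false
  | c :: t => if pvIsOp c then (if t.any PySem.Chars.isdigit then pvF t else true) else pvF t

theorem pvDigit_not_op (c : Char) (h : PySem.Chars.isdigit c = true) : pvIsOp c = false := by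
  by_contra hop
  simp only [Bool.not_eq_false, pvIsOp, Bool.or_eq_true, decide_eq_true_eq] at hop
  rcases hop with ((rfl | rfl) | rfl) | rfl <;> revert h <;> decide

theorem pvF_append (l : List Char) (c : Char) :
    pvF (l ++ [c]) = (pvIsOp c || (!(PySem.Chars.isdigit c) && pvF l)) := by
  induction l with
  | nil => simp [pvF]
  | cons x t ih =>
    simp only [List.cons_append, pvF, List.any_append, List.any_cons, List.any_nil]
    by_cases hx : pvIsOp x = true
    · simp only [hx, if_true]
      by_cases hdc : PySem.Chars.isdigit c = true
      · have := pvDigit_not_op c hdc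
        simp [hdc, ih, this]
      · simp only [Bool.not_eq_true] at hdc
        by_cases hdt : t.any PySem.Chars.isdigit = true
        · simp [hdc, hdt, ih]
        · simp only [Bool.not_eq_true] at hdt
          simp [hdc, hdt]
    · simp only [Bool.not_eq_true] at hx
      simp [hx, ih]

theorem pvLoopB_reverse (l : List Char) (hd : Bool) :
    pvLoopB hd l.reverse =
      (if l.any pvIsOp then .inl (!hd && pvF l) else .inr (hd || l.any PySem.Chars.isdigit)) := by
  induction l using List.reverseRecOn generalizing hd with
  | nil => simp [pvLoopB]
  | append_singleton t c ih =>
    rw [List.reverse_append]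
    simp only [List.reverse_singleton, List.singleton_append, pvLoopB, List.any_append,
      List.any_cons, List.any_nil, pvF_append]
    by_cases hdc : PySem.Chars.isdigit c = true
    · have hnop := pvDigit_not_op c hdc
      simp only [hdc, if_true, ih true, hnop]
      by_cases hop : t.any pvIsOp = true <;> simp [hop]
    · simp only [Bool.not_eq_true] at hdc
      by_cases hop : pvIsOp c = true
      · simp [hdc, hop]
      · simp only [Bool.not_eq_true] at hop
        simp [hdc, hop, ih hd]

theorem pvNoOp_F (l : List Char) (h : l.any pvIsOp = false) : pvF l = false := by
  induction l with
  | nil => rfl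
  | cons c t ih =>
    simp only [List.any_cons, Bool.or_eq_false_iff] at h
    simp [pvF, h.1, ih h.2]

theorem pvNoDigit_F (l : List Char) (hop : l.any pvIsOp = true)
    (hdg : l.any PySem.Chars.isdigit = false) : pvF l = true := by
  induction l with
  | nil => simp at hop
  | cons c t ih =>
    simp only [List.any_cons, Bool.or_eq_false_iff] at hdg
    simp only [List.any_cons, Bool.or_eq_true] at hop
    by_cases hc : pvIsOp c = true
    · simp [pvF, hc, hdg.2]
    · simp only [Bool.not_eq_true] at hc
      rcases hop with h | h
      · rw [hc] at h; exact absurd h (by simp)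
      · simp only [pvF, hc, Bool.false_eq_true, if_false]
        exact ih h hdg.2

theorem pvDrop_succ {full l : List Char} {c : Char} {n : Nat}
    (h : full.drop n = c :: l) : full.drop (n + 1) = l := by
  have h2 := congrArg (List.drop 1) h
  simpa [List.drop_drop] using h2

theorem pvLoopA_tail (l : List Char) (full : List Char) (length : Int) (i : Int)
    (hi : 1 ≤ i) (hdrop : full.drop i.toNat = l) :
    pvLoopA full length (PySem.List.enumerate l i) = pvF l := by
  induction l generalizing i with
  | nil => simp [PySem.List.enumerate_nil, pvLoopA, pvF]
  | cons c t ih =>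
    rw [PySem.List.enumerate_cons]
    have hne : ¬ (c = '-' ∧ i = 0 ∧ length > 1) := by
      rintro ⟨-, h0, -⟩; omega
    have hslice : PySem.List.slice full (some (i + 1)) none = t := by
      rw [PySem.List.slice_from full (show (0:Int) ≤ i + 1 from by omega)]
      have : (i + 1).toNat = i.toNat + 1 := by omega
      rw [this, pvDrop_succ hdrop]
    have ht : full.drop (i + 1).toNat = t := by
      have : (i + 1).toNat = i.toNat + 1 := by omega
      rw [this, pvDrop_succ hdrop]
    by_cases hc : pvIsOp c = true
    · simp only [pvLoopA, hc, not_true, if_false, hne, if_false, hslice]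
      by_cases hte : t = []
      · subst hte; simp [pvF, hc]
      · simp only [hte, if_false]
        by_cases hdg : t.any PySem.Chars.isdigit = true
        · simp [pvF, hc, hdg, ih (i + 1) (by omega) ht]
        · simp only [Bool.not_eq_true] at hdg
          simp [pvF, hc, hdg]
    · simp only [Bool.not_eq_true] at hc
      simp [pvLoopA, pvF, hc, ih (i + 1) (by omega) ht]

-- ===== VERDICT (by name: the statement is the Claim_ definition above) =====
theorem has_operator_without_operand_py_spec : Claim_equal_has_operator_without_operand_py := by
  intro s _
  unfold Spec_has_operator_without_operand_py
  unfold has_operator_without_operand_py has_operator_without_operand_py_alt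
  cases hs : s.toList with
  | nil => simp [PySem.List.enumerate_nil, pvLoopA]
  | cons c t =>
    dsimp only
    have htail : pvLoopA (c :: t) (Int.ofNat (c :: t).length) (PySem.List.enumerate t (0 + 1)) = pvF t :=
      pvLoopA_tail t _ _ (0 + 1) (by omega) (by simp)
    have hslice : PySem.List.slice (c :: t) (some ((0:Int) + 1)) none = t := by
      rw [PySem.List.slice_from _ (show (0:Int) ≤ 0 + 1 from by omega)]; simp
    have hlen : (Int.ofNat (c :: t).length > 1) ↔ t ≠ [] := by cases t <;> simp
    rw [PySem.List.enumerate_cons, pvLoopB_reverse, pvLoopA, hslice]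
    dsimp only
    simp only [Bool.not_false, Bool.true_and, Bool.false_or]
    by_cases hopt : t.any pvIsOp = true
    · have hte : t ≠ [] := by rintro rfl; simp at hopt
      rw [if_pos hopt]
      dsimp only
      by_cases hc : pvIsOp c = true
      · rw [if_neg (not_not_intro hc)]
        by_cases hm : c = '-'
        · rw [if_pos ⟨hm, trivial, hlen.mpr hte⟩, htail]
        · rw [if_neg (show ¬(c = '-' ∧ True ∧ Int.ofNat (c :: t).length > 1) from
              by rintro ⟨h, -, -⟩; exact hm h), if_neg hte]
          by_cases hdg : t.any PySem.Chars.isdigit = true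
          · rw [if_neg (not_not_intro hdg), htail]
          · simp only [Bool.not_eq_true] at hdg
            rw [if_pos (show ¬t.any PySem.Chars.isdigit = true from by simp [hdg]),
              pvNoDigit_F t hopt hdg]
      · simp only [Bool.not_eq_true] at hc
        rw [if_pos (show ¬pvIsOp c = true from by simp [hc]), htail]
    · simp only [Bool.not_eq_true] at hopt
      have hF : pvF t = false := pvNoOp_F t hopt
      rw [if_neg (show ¬t.any pvIsOp = true from by simp [hopt])]
      dsimp only
      by_cases hc : pvIsOp c = true
      · rw [if_neg (not_not_intro hc)]
        by_cases hex : c = '-' ∧ t ≠ []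
        · rw [if_pos ⟨hex.1, trivial, hlen.mpr hex.2⟩, htail, hF,
            if_neg (show ¬(pvIsOp c = true ∧ ¬(c = '-' ∧ t ≠ [])) from by rintro ⟨-, h⟩; exact h hex)]
        · rw [if_neg (show ¬(c = '-' ∧ True ∧ Int.ofNat (c :: t).length > 1) from
              by rintro ⟨hm, -, hl⟩; exact hex ⟨hm, hlen.mp hl⟩),
            if_pos (show pvIsOp c = true ∧ ¬(c = '-' ∧ t ≠ []) from ⟨hc, hex⟩)]
          by_cases hte : t = []
          · subst hte; simp
          · rw [if_neg hte]
            by_cases hdg : t.any PySem.Chars.isdigit = true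
            · rw [if_neg (not_not_intro hdg), htail, hF]
              simp [hdg]
            · simp only [Bool.not_eq_true] at hdg
              rw [if_pos (show ¬t.any PySem.Chars.isdigit = true from by simp [hdg])]
              simp [hdg]
      · simp only [Bool.not_eq_true] at hc
        rw [if_pos (show ¬pvIsOp c = true from by simp [hc]), htail, hF,
          if_neg (show ¬(pvIsOp c = true ∧ ¬(c = '-' ∧ t ≠ [])) from
            by rintro ⟨h, -⟩; rw [hc] at h; exact absurd h (by simp))]
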